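-- pv_equiv track=rewrite | github.com/TheStek/AdventOfCode2023 | Day 9/part2.py | get_previous_value
-- ===== SOURCE A (Python) =====
-- def get_differences(nums):
-- 	return list(map(lambda x: x[1] - x[0], zip(nums, nums[1:])))
--
-- all_zeroes = lambda x: all([i == 0 for i in x])
--
-- def get_previous_value(nums):
-- 	sequences = [nums]
-- 	while not all_zeroes(sequences[-1]):
-- 		sequences.append(get_differences(sequences[-1]))
-- 	sequences.reverse()
--
--
-- 	for i in range(len(sequences)-1):
-- 		sequences[i+1].insert(0, sequences[i+1][0] - sequences[i][0])
--
-- 	return sequences[-1][0]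
-- ===== SOURCE B (Python) =====
-- # Backward extrapolation by direct recursion: a constant row's previous value
-- # is its first element; otherwise it is the first element minus the previous
-- # value of the difference row.
-- def get_previous_value(nums):
-- 	if all(v == 0 for v in nums):
-- 		return nums[0]
-- 	return nums[0] - get_previous_value([b - a for a, b in zip(nums, nums[1:])])
-- ===== Notes on version B (the rewrite author's own statement) =====
-- stated objective: simpler
-- what changed: Instead of materialising the whole difference table, reversing it and running a bottom-up front-insertion loop (which also mutates nums by prepending the result), B is the direct three-line recursion 'first element minus previous value of the difference row'; Pre_ excludes the inputs on which both raise IndexError (empty list, or a difference tower that bottoms out in a single nonzero element).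
import Mathlib
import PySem

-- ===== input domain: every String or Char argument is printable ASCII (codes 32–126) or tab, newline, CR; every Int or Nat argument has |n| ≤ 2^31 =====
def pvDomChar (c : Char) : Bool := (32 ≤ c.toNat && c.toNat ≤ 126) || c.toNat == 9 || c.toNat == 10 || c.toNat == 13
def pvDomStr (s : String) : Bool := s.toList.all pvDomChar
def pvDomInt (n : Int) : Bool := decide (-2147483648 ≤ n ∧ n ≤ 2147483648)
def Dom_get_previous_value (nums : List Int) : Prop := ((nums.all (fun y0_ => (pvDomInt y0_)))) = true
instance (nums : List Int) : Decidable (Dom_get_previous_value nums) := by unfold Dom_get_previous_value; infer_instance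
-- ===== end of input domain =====

-- B replaces A's table-reverse-and-insert recurrence by the direct recursion
-- "first element minus previous value of the difference row" (simpler). A also
-- mutates nums (prepends the result); B does not: the equivalence proved is about
-- the RETURN value only.

-- ===== PORT A =====
-- all_zeroes
def pyAll0 (x : List Int) : Bool := x.all (fun i => i == 0)

-- get_differences(nums); nums[1:] on a list is exactly List.drop 1
def pyDiffs (nums : List Int) : List Int :=
  (nums.zip (nums.drop 1)).map (fun x => x.2 - x.1)

theorem pyDiffs_length_lt (cur : List Int) (h : cur ≠ []) :
    (pyDiffs cur).length < cur.length := by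
  cases cur with
  | nil => exact absurd rfl h
  | cons a t => simp [pyDiffs]

-- the while loop: sequences = [nums]; append diffs until last row is all zeroes
def buildSeqs (cur : List Int) : List (List Int) :=
  if pyAll0 cur then [cur] else cur :: buildSeqs (pyDiffs cur)
termination_by cur.length
decreasing_by
  rename_i h
  exact pyDiffs_length_lt cur (fun hc => h (by simp [hc, pyAll0]))

-- the for loop after sequences.reverse(): prev carries sequences[i][0] after its
-- update; row[0] on the (inside Pre_ always nonempty) rows is taken with headD 0
def loopA (prev : Int) : List (List Int) → Int
  | [] => prev
  | row :: rest => loopA (row.headD 0 - prev) rest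

def get_previous_value (nums : List Int) : Int :=
  match (buildSeqs nums).reverse with
  | [] => 0   -- unreachable: buildSeqs is never empty
  | s0 :: rest => loopA (s0.headD 0) rest

-- ===== PORT B =====
-- direct recursion; nums[0] (inside Pre_ always on a nonempty list) is headD 0
def get_previous_value_alt (nums : List Int) : Int :=
  if nums.all (fun v => v == 0) then nums.headD 0
  else nums.headD 0 - get_previous_value_alt ((nums.zip (nums.drop 1)).map (fun p => p.2 - p.1))
termination_by nums.length
decreasing_by
  rename_i h
  refine pyDiffs_length_lt nums (fun hc => ?_)
  subst hc; simp at h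

-- ===== PRECONDITION & SPEC =====
-- the (n-1)-th finite difference of nums at 0, up to sign: the single element the
-- tower bottoms out in
def altBinomSum (nums : List Int) : Int :=
  (List.range nums.length).foldl
    (fun s k => s + (-1 : Int) ^ k * (Nat.choose (nums.length - 1) k : Int) * nums.getD k 0) 0

-- Pre_ excludes exactly the inputs where Python A raises IndexError: the empty list
-- and the lists whose difference tower reaches a nonzero single element (equivalently,
-- whose (n-1)-th finite difference is nonzero), so the tower's last row is empty.
def Pre_get_previous_value (nums : List Int) : Prop :=
  nums ≠ [] ∧ altBinomSum nums = 0
instance (nums : List Int) : Decidable (Pre_get_previous_value nums) := by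
  unfold Pre_get_previous_value; infer_instance

def pvWitness_get_previous_value : List Int := [1, 4, 9, 16]

def Spec_get_previous_value (nums : List Int) (out : Int) : Prop := out = get_previous_value_alt nums
instance (nums : List Int) (out : Int) : Decidable (Spec_get_previous_value nums out) := by unfold Spec_get_previous_value; infer_instance

-- ===== CLAIM (what is proved, stated in full; the proofs are below) =====
def Claim_equal_get_previous_value : Prop := ∀ (nums : List Int), Dom_get_previous_value nums → Pre_get_previous_value nums → Spec_get_previous_value nums (get_previous_value nums)

-- ===== LEMMAS AND PROOFS =====

theorem buildSeqs_ne_nil (cur : List Int) : buildSeqs cur ≠ [] := by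
  unfold buildSeqs; split <;> simp

theorem loopA_append (prev : Int) (l : List (List Int)) (row : List Int) :
    loopA prev (l ++ [row]) = row.headD 0 - loopA prev l := by
  induction l generalizing prev with
  | nil => simp [loopA]
  | cons r t ih => simp [loopA, ih]

theorem A_all0 (cur : List Int) (h : pyAll0 cur = true) :
    get_previous_value cur = cur.headD 0 := by
  unfold get_previous_value buildSeqs
  simp [h, loopA]

theorem A_step (cur : List Int) (h : pyAll0 cur = false) :
    get_previous_value cur = cur.headD 0 - get_previous_value (pyDiffs cur) := by
  obtain ⟨s0, rest, hL⟩ : ∃ s0 rest, (buildSeqs (pyDiffs cur)).reverse = s0 :: rest := by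
    rcases List.exists_cons_of_ne_nil
      (l := (buildSeqs (pyDiffs cur)).reverse)
      (by simpa using buildSeqs_ne_nil (pyDiffs cur)) with ⟨s0, rest, h'⟩
    exact ⟨s0, rest, h'⟩
  conv_lhs => unfold get_previous_value buildSeqs
  simp only [h, Bool.false_eq_true, if_false, List.reverse_cons, hL]
  rw [show (s0 :: rest) ++ [cur] = s0 :: (rest ++ [cur]) by simp]
  simp only [loopA_append]
  unfold get_previous_value
  rw [hL]

theorem alt_eq (cur : List Int) : get_previous_value_alt cur = get_previous_value cur := by
  induction cur using buildSeqs.induct with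
  | case1 cur h =>
    rw [get_previous_value_alt.eq_def]
    have h' : cur.all (fun v => v == 0) = true := h
    simp only [h', if_true]
    rw [A_all0 cur h]
  | case2 cur h ih =>
    have hf : pyAll0 cur = false := by simpa using h
    have h' : cur.all (fun v => v == 0) = false := hf
    rw [get_previous_value_alt.eq_def]
    simp only [h', Bool.false_eq_true, if_false]
    have : ((cur.zip (cur.drop 1)).map (fun p => p.2 - p.1)) = pyDiffs cur := rfl
    rw [this, ih, A_step cur hf]

-- ===== VERDICT (by name: the statement is the Claim_ definition above) =====
theorem get_previous_value_spec : Claim_equal_get_previous_value := by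
  intro nums _ _
  unfold Spec_get_previous_value
  rw [alt_eq]
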